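-- pv_equiv track=rewrite | github.com/yungdennek/KenKen-Solver | Ken Ken Solver.py | comb_of_pos
-- ===== SOURCE A (Python) =====
-- def comb_of_pos(combs, p):
--     block, place = 0, 0
--     pos = []
--     for comb in combs:
--         pos.append(comb[1])
--     l_i = len(pos)
--     for i in range(l_i):
--         posit = pos[i]
--         l_j = len(posit)
--         for j in range(l_j):
--             if(posit[j] == p):
--                 block = i
--                 place = j
--     return block, place
-- ===== SOURCE B (Python) =====
-- def comb_of_pos(combs, p):
--     for i in range(len(combs) - 1, -1, -1):
--         posit = combs[i][1]
--         for j in range(len(posit) - 1, -1, -1):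
--             if posit[j] == p:
--                 return i, j
--     return 0, 0
-- ===== Notes on version B (the rewrite author's own statement) =====
-- stated objective: alternative
-- what changed: B scans blocks and their elements in reverse order and returns immediately at the first match (equal to A's last forward match), instead of A's exhaustive forward scan that keeps overwriting the result.
import Mathlib
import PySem

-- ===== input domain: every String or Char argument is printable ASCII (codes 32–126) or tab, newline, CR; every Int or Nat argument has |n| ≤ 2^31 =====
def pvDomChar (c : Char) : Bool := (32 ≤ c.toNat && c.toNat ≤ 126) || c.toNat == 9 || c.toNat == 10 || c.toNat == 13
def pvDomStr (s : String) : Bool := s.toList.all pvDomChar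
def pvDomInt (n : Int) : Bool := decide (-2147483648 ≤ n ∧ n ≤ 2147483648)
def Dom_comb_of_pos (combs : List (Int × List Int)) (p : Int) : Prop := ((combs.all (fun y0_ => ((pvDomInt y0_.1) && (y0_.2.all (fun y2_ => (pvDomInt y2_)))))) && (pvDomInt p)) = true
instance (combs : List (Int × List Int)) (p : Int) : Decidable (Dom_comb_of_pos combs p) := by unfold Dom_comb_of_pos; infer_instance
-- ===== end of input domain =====

-- B reverses the traversal (last block first, last element first) and exits at the first
-- match, which is A's last forward match; proved equal to A's full forward scan.

-- ===== PORT A =====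
-- inner loop 'for j in range(l_j): if posit[j] == p: block, place = i, j'
def combA_inner (posit : List Int) (p : Int) (i : Int) (j : Int) (st : Int × Int) : Int × Int :=
  match posit with
  | [] => st
  | x :: rest => combA_inner rest p i (j + 1) (if x = p then (i, j) else st)

-- outer loop 'for i in range(l_i): ...'
def combA_outer (pos : List (List Int)) (p : Int) (i : Int) (st : Int × Int) : Int × Int :=
  match pos with
  | [] => st
  | posit :: rest => combA_outer rest p (i + 1) (combA_inner posit p i 0 st)

def comb_of_pos (combs : List (Int × List Int)) (p : Int) : Int × Int :=
  -- 'pos = [comb[1] for comb in combs]' (the append loop), then the two index loops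
  combA_outer (combs.map (fun comb => comb.2)) p 0 (0, 0)

-- ===== PORT B =====
-- inner loop 'for j in range(len(posit)-1, -1, -1)': walk posit.reverse with j counting down
def combB_inner (rev : List Int) (p : Int) (j : Int) : Option Int :=
  match rev with
  | [] => none
  | x :: rest => if x = p then some j else combB_inner rest p (j - 1)

-- outer loop 'for i in range(len(combs)-1, -1, -1)': walk combs.reverse with i counting down
def combB_outer (rev : List (Int × List Int)) (p : Int) (i : Int) : Option (Int × Int) :=
  match rev with
  | [] => none
  | c :: rest =>
    match combB_inner c.2.reverse p ((c.2.length : Int) - 1) with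
    | some j => some (i, j)
    | none => combB_outer rest p (i - 1)

def comb_of_pos_alt (combs : List (Int × List Int)) (p : Int) : Int × Int :=
  (combB_outer combs.reverse p ((combs.length : Int) - 1)).getD (0, 0)

-- ===== PRECONDITION & SPEC =====
def Spec_comb_of_pos (combs : List (Int × List Int)) (p : Int) (out : Int × Int) : Prop := out = comb_of_pos_alt combs p
instance (combs : List (Int × List Int)) (p : Int) (out : Int × Int) : Decidable (Spec_comb_of_pos combs p out) := by unfold Spec_comb_of_pos; infer_instance

-- ===== CLAIM (what is proved, stated in full; the proofs are below) =====
def Claim_equal_comb_of_pos : Prop := ∀ (combs : List (Int × List Int)) (p : Int), Dom_comb_of_pos combs p → Spec_comb_of_pos combs p (comb_of_pos combs p)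

-- ===== LEMMAS AND PROOFS =====

-- last index of p in xs (characterisation used by both sides)
def lastIdx (xs : List Int) (p : Int) : Option Nat :=
  match xs with
  | [] => none
  | x :: rest =>
    match lastIdx rest p with
    | some k => some (k + 1)
    | none => if x = p then some 0 else none

-- last (block, place) of p in pos
def lastPos (pos : List (List Int)) (p : Int) : Option (Nat × Nat) :=
  match pos with
  | [] => none
  | posit :: rest =>
    match lastPos rest p with
    | some (i, j) => some (i + 1, j)
    | none => (lastIdx posit p).map (fun j => (0, j))

theorem combA_inner_eq (posit : List Int) (p : Int) (i j0 : Int) (st : Int × Int) :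
    combA_inner posit p i j0 st =
      match lastIdx posit p with
      | some k => (i, j0 + (k : Int))
      | none => st := by
  induction posit generalizing j0 st with
  | nil => simp [combA_inner, lastIdx]
  | cons x rest ih =>
    simp only [combA_inner, lastIdx, ih]
    cases h : lastIdx rest p with
    | some k => push_cast; ring_nf
    | none => split_ifs <;> simp

theorem combA_outer_eq (pos : List (List Int)) (p : Int) (i0 : Int) (st : Int × Int) :
    combA_outer pos p i0 st =
      match lastPos pos p with
      | some (i, j) => (i0 + (i : Int), (j : Int))
      | none => st := by
  induction pos generalizing i0 st with
  | nil => simp [combA_outer, lastPos]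
  | cons posit rest ih =>
    simp only [combA_outer, lastPos, ih, combA_inner_eq]
    cases h : lastPos rest p with
    | some ij => obtain ⟨i, j⟩ := ij; push_cast; ring_nf
    | none =>
      cases h2 : lastIdx posit p with
      | some k => simp
      | none => simp

theorem lastIdx_append (xs : List Int) (x p : Int) :
    lastIdx (xs ++ [x]) p =
      if x = p then some xs.length else lastIdx xs p := by
  induction xs with
  | nil => simp [lastIdx]
  | cons y ys ih =>
    simp only [List.cons_append, lastIdx, ih]
    split_ifs <;> cases h : lastIdx ys p <;> simp [List.length_cons]

theorem lastPos_append (pos : List (List Int)) (c : List Int) (p : Int) :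
    lastPos (pos ++ [c]) p =
      match lastIdx c p with
      | some j => some (pos.length, j)
      | none => lastPos pos p := by
  induction pos with
  | nil => cases h : lastIdx c p <;> simp [lastPos, h]
  | cons x xs ih =>
    simp only [List.cons_append, lastPos, ih]
    cases h : lastIdx c p with
    | some j => simp [List.length_cons]
    | none => rfl

theorem combB_inner_eq (xs : List Int) (p : Int) :
    combB_inner xs.reverse p ((xs.length : Int) - 1) =
      (lastIdx xs p).map (fun k => (k : Int)) := by
  induction xs using List.reverseRecOn with
  | nil => simp [combB_inner, lastIdx]
  | append_singleton ys x ih =>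
    rw [List.reverse_append]
    simp only [List.reverse_singleton, List.singleton_append, combB_inner,
      List.length_append, List.length_singleton, lastIdx_append]
    have : ((ys.length + 1 : Nat) : Int) - 1 = (ys.length : Int) := by push_cast; ring
    rw [this]
    split_ifs with h
    · simp
    · have : (ys.length : Int) - 1 = ((ys.length : Nat) : Int) - 1 := by norm_cast
      rw [this, ih]

theorem combB_outer_eq (combs : List (Int × List Int)) (p : Int) :
    combB_outer combs.reverse p ((combs.length : Int) - 1) =
      (lastPos (combs.map (fun c => c.2)) p).map (fun ij => ((ij.1 : Int), (ij.2 : Int))) := by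
  induction combs using List.reverseRecOn with
  | nil => simp [combB_outer, lastPos]
  | append_singleton ys c ih =>
    rw [List.reverse_append]
    simp only [List.reverse_singleton, List.singleton_append, combB_outer,
      List.length_append, List.length_singleton, List.map_append, List.map_cons,
      List.map_nil, lastPos_append, combB_inner_eq]
    have e1 : ((ys.length + 1 : Nat) : Int) - 1 = (ys.length : Int) := by push_cast; ring
    rw [e1]
    cases h : lastIdx c.2 p with
    | some j => simp [List.length_map]
    | none => simp; exact ih

-- ===== VERDICT (by name: the statement is the Claim_ definition above) =====
theorem comb_of_pos_spec : Claim_equal_comb_of_pos := by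
  intro combs p _
  unfold Spec_comb_of_pos comb_of_pos comb_of_pos_alt
  rw [combA_outer_eq, combB_outer_eq]
  cases h : lastPos (combs.map (fun c => c.2)) p with
  | none => rfl
  | some ij => obtain ⟨i, j⟩ := ij; simp
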